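-- pv_equiv track=rewrite | github.com/grassknoted/pathtracker-data | cluster_store_individual_modular_spline_curve_generator_path_finder_motion_race_distractor_many_fixed_blob_128_permanent_markers_square_numpy.py | check_range_set
-- ===== SOURCE A (Python) =====
-- def check_range_set(s, number, interval=2):
--     '''
--     Checks if the number is in the set
--     along with the intervals on either
--     side of the number line.
--     For eg: if number is 10, and interval
--     is 2, then this will check if the
--     numbers 8,9,10,11,12 are in the given set
--     or not.
--
--     Returns: True if the range is in set
--     False otherwise
--     '''
--     ret=False
--     if interval:
--         # for non zero intervals
--         for i in range(number-interval,number+interval+1):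
--             if i in s:
--                 ret=True
--         return ret
--     else:
--         # for zero interval
--         if number in s:
--             ret=True
--         return ret
-- ===== SOURCE B (Python) =====
-- def check_range_set(s, number, interval=2):
--     # One pass over the set: x is in range(number-interval, number+interval+1)
--     # iff number-interval <= x <= number+interval (empty when interval < 0,
--     # a singleton test when interval == 0), so no branch on interval is needed.
--     return any(number - interval <= x <= number + interval for x in s)
-- ===== Notes on version B (the rewrite author's own statement) =====
-- stated objective: alternative
-- what changed: Instead of scanning the O(interval) range and testing each value's membership in s, B makes a single pass over s testing each element against the interval bounds (with the interval==0 and negative-interval cases subsumed by the same inequality, no branching).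
import Mathlib
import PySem

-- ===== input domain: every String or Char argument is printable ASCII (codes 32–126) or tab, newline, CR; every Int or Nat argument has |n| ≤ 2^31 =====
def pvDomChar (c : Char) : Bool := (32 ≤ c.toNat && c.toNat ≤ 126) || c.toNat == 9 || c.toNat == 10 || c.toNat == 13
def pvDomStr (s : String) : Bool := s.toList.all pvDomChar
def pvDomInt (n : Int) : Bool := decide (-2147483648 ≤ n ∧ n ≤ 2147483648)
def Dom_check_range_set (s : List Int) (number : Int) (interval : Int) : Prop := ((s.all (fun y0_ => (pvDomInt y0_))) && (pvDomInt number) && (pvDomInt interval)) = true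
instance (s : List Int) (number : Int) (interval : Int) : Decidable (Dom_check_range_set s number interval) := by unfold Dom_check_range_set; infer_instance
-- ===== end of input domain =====

-- B replaces A's scan over the O(interval)-long range (membership-testing s for each value)
-- by a single pass over s testing the interval bounds; alternative decomposition, no branch on interval.

-- ===== PORT A =====
def check_range_set (s : List Int) (number : Int) (interval : Int) : Bool :=
  -- ret = False; if interval: loop over range setting ret; else: test number in s
  if interval ≠ 0 then
    (PySem.List.pyRange (number - interval) (number + interval + 1) 1).foldl
      (fun ret i => if s.contains i then true else ret) false
  else
    if s.contains number then true else false

-- ===== PORT B =====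
def check_range_set_alt (s : List Int) (number : Int) (interval : Int) : Bool :=
  s.any (fun x => decide (number - interval ≤ x ∧ x ≤ number + interval))

-- ===== PRECONDITION & SPEC =====
def Spec_check_range_set (s : List Int) (number : Int) (interval : Int) (out : Bool) : Prop := out = check_range_set_alt s number interval
instance (s : List Int) (number : Int) (interval : Int) (out : Bool) : Decidable (Spec_check_range_set s number interval out) := by unfold Spec_check_range_set; infer_instance

-- ===== CLAIM (what is proved, stated in full; the proofs are below) =====
def Claim_equal_check_range_set : Prop := ∀ (s : List Int) (number : Int) (interval : Int), Dom_check_range_set s number interval → Spec_check_range_set s number interval (check_range_set s number interval)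

-- ===== LEMMAS AND PROOFS =====

-- A's loop never resets ret: it computes init || any
theorem foldl_set_true (p : Int → Bool) (l : List Int) (init : Bool) :
    l.foldl (fun ret i => if p i then true else ret) init = (init || l.any p) := by
  induction l generalizing init with
  | nil => simp
  | cons a t ih => simp only [List.foldl_cons, List.any_cons, ih]; by_cases h : p a = true <;> simp [h]

-- ===== VERDICT (by name: the statement is the Claim_ definition above) =====
theorem check_range_set_spec : Claim_equal_check_range_set := by
  intro s number interval _
  unfold Spec_check_range_set check_range_set check_range_set_alt
  by_cases h : interval = 0
  · subst h
    simp only [ne_eq, not_true_eq_false, if_false]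
    by_cases hm : number ∈ s
    · rw [if_pos (List.contains_iff_mem.mpr hm)]
      symm
      simp only [List.any_eq_true, decide_eq_true_eq]
      exact ⟨number, hm, by omega⟩
    · rw [if_neg (fun hc => hm (List.contains_iff_mem.mp hc))]
      symm
      simp only [List.any_eq_false, decide_eq_true_eq]
      rintro x hx ⟨h1, h2⟩
      have hxe : x = number := by omega
      exact hm (hxe ▸ hx)
  · simp only [ne_eq, h, not_false_eq_true, if_true, foldl_set_true, Bool.false_or]
    rw [Bool.eq_iff_iff]
    simp only [List.any_eq_true, List.contains_iff_mem, PySem.List.mem_pyRange_one,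
      decide_eq_true_eq]
    constructor
    · rintro ⟨i, ⟨h1, h2⟩, hi⟩; exact ⟨i, hi, by omega, by omega⟩
    · rintro ⟨x, hx, h1, h2⟩; exact ⟨x, ⟨by omega, by omega⟩, hx⟩
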